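-- pv_equiv track=rewrite | github.com/calmkart/myblog | beautify_posts.py | add_more_tag
-- ===== SOURCE A (Python) =====
-- def add_more_tag(body):
--     """Add <!--more--> after the first paragraph if missing."""
--     if '<!--more-->' in body or '<!-- more -->' in body:
--         return body
--
--     lines = body.split('\n')
--     # Find end of first non-empty paragraph
--     in_paragraph = False
--     insert_pos = -1
--     for i, line in enumerate(lines):
--         stripped = line.strip()
--         if not stripped:
--             if in_paragraph:
--                 insert_pos = i
--                 break
--             continue
--         if stripped.startswith('#'):
--             # Skip headers, look for next paragraph
--             continue
--         if stripped.startswith('```'):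
--             # Don't insert in code blocks
--             break
--         in_paragraph = True
--
--     if insert_pos > 0:
--         lines.insert(insert_pos, '\n<!--more-->')
--         return '\n'.join(lines)
--     return body
-- ===== SOURCE B (Python) =====
-- def add_more_tag(body):
--     """Add <!--more--> after the first paragraph if missing."""
--     if '<!--more-->' in body or '<!-- more -->' in body:
--         return body
--
--     lines = body.split('\n')
--     # Classify every line once, then work with indices on the category list.
--     def cat(line):
--         s = line.strip()
--         if not s:
--             return 'blank'
--         if s.startswith('```'):
--             return 'fence'
--         if s.startswith('#'):
--             return 'header'
--         return 'text'
--     cats = [cat(l) for l in lines]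
--
--     t = next((i for i, c in enumerate(cats) if c == 'text'), None)
--     if t is None or 'fence' in cats[:t]:
--         return body
--     tail = cats[t + 1:]
--     b = next((j for j, c in enumerate(tail) if c == 'blank'), None)
--     if b is None or 'fence' in tail[:b]:
--         return body
--     pos = t + 1 + b
--     return '\n'.join(lines[:pos] + ['\n<!--more-->'] + lines[pos:])
-- ===== Notes on version B (the rewrite author's own statement) =====
-- stated objective: alternative
-- what changed: Replaced A's stateful scan (in_paragraph flag, break, sentinel insert_pos, in-place insert) by a declarative index computation on a precomputed per-line category list: the index of the first text-classified line, fence-membership checks on slices, the index of the first blank-classified line in the tail, and output built by slicing and concatenation.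
import Mathlib
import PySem

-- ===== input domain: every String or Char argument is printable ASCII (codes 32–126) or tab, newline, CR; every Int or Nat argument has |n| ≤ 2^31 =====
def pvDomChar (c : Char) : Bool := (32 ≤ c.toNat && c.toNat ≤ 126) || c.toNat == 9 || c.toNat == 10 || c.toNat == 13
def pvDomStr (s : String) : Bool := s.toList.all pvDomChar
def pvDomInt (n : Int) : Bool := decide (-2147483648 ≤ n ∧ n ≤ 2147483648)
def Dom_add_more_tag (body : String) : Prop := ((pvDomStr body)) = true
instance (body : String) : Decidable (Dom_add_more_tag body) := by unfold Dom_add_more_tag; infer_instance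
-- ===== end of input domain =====

-- B replaces A's stateful scan (in_paragraph flag, break, sentinel) by a declarative index
-- computation over a precomputed per-line category list (objective: alternative decomposition).

-- ===== PORT A =====
-- A's single for-loop with its in_paragraph flag; `some i` = the loop broke with insert_pos = i,
-- `none` = insert_pos stayed -1 (loop ended or broke at a code fence).
def pvLoopA : List String → Nat → Bool → Option Nat
  | [], _, _ => none
  | l :: rest, i, inp =>
    let s := PySem.Str.strip l
    if s = "" then
      (if inp then some i else pvLoopA rest (i + 1) inp)
    else if PySem.Str.startswith s "#" then pvLoopA rest (i + 1) inp
    else if PySem.Str.startswith s "```" then none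
    else pvLoopA rest (i + 1) true

def add_more_tag (body : String) : String :=
  if PySem.Str.isIn "<!--more-->" body || PySem.Str.isIn "<!-- more -->" body then body
  else
    -- lines = body.split('\n'); the separator "\n" is non-empty, so split? is some
    match pvLoopA ((PySem.Str.split? body "\n").getD []) 0 false with
    | some p =>
        if p > 0 then
          PySem.Str.join "\n" (PySem.List.insert ((PySem.Str.split? body "\n").getD []) (p : Int) "\n<!--more-->")
        else body
    | none => body

-- ===== PORT B =====
-- Source B's `cat`: classify one line
def pvCat (l : String) : String :=
  let s := PySem.Str.strip l
  if s = "" then "blank"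
  else if PySem.Str.startswith s "```" then "fence"
  else if PySem.Str.startswith s "#" then "header"
  else "text"

def add_more_tag_alt (body : String) : String :=
  if PySem.Str.isIn "<!--more-->" body || PySem.Str.isIn "<!-- more -->" body then body
  else
    let lines := (PySem.Str.split? body "\n").getD []
    let cats := lines.map pvCat
    -- t = next((i for i, c in enumerate(cats) if c == 'text'), None)
    match cats.findIdx? (· = "text") with
    | none => body
    | some t =>
      if "fence" ∈ cats.take t then body
      else
        let tail := cats.drop (t + 1)
        match tail.findIdx? (· = "blank") with
        | none => body
        | some b =>
          if "fence" ∈ tail.take b then body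
          else
            let pos := t + 1 + b
            PySem.Str.join "\n" (lines.take pos ++ ["\n<!--more-->"] ++ lines.drop pos)

-- ===== PRECONDITION & SPEC =====
def Spec_add_more_tag (body : String) (out : String) : Prop := out = add_more_tag_alt body
instance (body : String) (out : String) : Decidable (Spec_add_more_tag body out) := by unfold Spec_add_more_tag; infer_instance

-- ===== CLAIM =====
def Claim_equal_add_more_tag : Prop := ∀ (body : String), Dom_add_more_tag body → Spec_add_more_tag body (add_more_tag body)

-- ===== LEMMAS AND PROOFS =====

-- proof-side scans over the precomputed category list, parameterised by the running offset
def pvBscanC (cats : List String) (i : Nat) : Option Nat :=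
  match cats.findIdx? (· = "blank") with
  | none => none
  | some b => if "fence" ∈ cats.take b then none else some (i + b)

def pvTscanC (cats : List String) (i : Nat) : Option Nat :=
  match cats.findIdx? (· = "text") with
  | none => none
  | some t =>
    if "fence" ∈ cats.take t then none
    else pvBscanC (cats.drop (t + 1)) (i + t + 1)

-- a stripped line starting with '#' cannot also start with '```', and vice versa
theorem pvHashNotFence (s : String) (h : PySem.Str.startswith s "#" = true) :
    PySem.Str.startswith s "```" = false := by
  simp only [PySem.Str.startswith_eq] at h ⊢
  rw [PySem.Chars.startswith_iff] at h
  obtain ⟨t, ht⟩ := h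
  rw [Bool.eq_false_iff]
  intro hf
  rw [PySem.Chars.startswith_iff, ← ht] at hf
  obtain ⟨u, hu⟩ := hf
  simp at hu

-- the four case characterisations of pvCat
theorem pvCat_blank (l : String) (h : PySem.Str.strip l = "") : pvCat l = "blank" := by
  simp only [pvCat]; rw [if_pos h]

theorem pvCat_header (l : String) (h1 : ¬ PySem.Str.strip l = "")
    (h2 : PySem.Str.startswith (PySem.Str.strip l) "#" = true) : pvCat l = "header" := by
  simp only [pvCat]
  rw [if_neg h1, if_neg (by rw [pvHashNotFence _ h2]; exact Bool.false_ne_true), if_pos h2]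

theorem pvCat_fence (l : String) (h1 : ¬ PySem.Str.strip l = "")
    (h3 : PySem.Str.startswith (PySem.Str.strip l) "```" = true) : pvCat l = "fence" := by
  simp only [pvCat]; rw [if_neg h1, if_pos h3]

theorem pvCat_text (l : String) (h1 : ¬ PySem.Str.strip l = "")
    (h2 : ¬ PySem.Str.startswith (PySem.Str.strip l) "#" = true)
    (h3 : ¬ PySem.Str.startswith (PySem.Str.strip l) "```" = true) : pvCat l = "text" := by
  simp only [pvCat]; rw [if_neg h1, if_neg h3, if_neg h2]

-- step lemmas of the blank scan, per literal head category
theorem pvBscanC_blank (cs : List String) (i : Nat) : pvBscanC ("blank" :: cs) i = some i := by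
  simp [pvBscanC, List.findIdx?_cons]

theorem pvBscanC_fence (cs : List String) (i : Nat) : pvBscanC ("fence" :: cs) i = none := by
  simp only [pvBscanC, List.findIdx?_cons]
  rw [if_neg (by decide : ¬ decide (("fence" : String) = "blank") = true)]
  cases hf : cs.findIdx? (· = "blank") with
  | none => simp
  | some b => simp [List.take_succ_cons]

theorem pvBscanC_header (cs : List String) (i : Nat) :
    pvBscanC ("header" :: cs) i = pvBscanC cs (i + 1) := by
  simp only [pvBscanC, List.findIdx?_cons]
  rw [if_neg (by decide : ¬ decide (("header" : String) = "blank") = true)]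
  cases hf : cs.findIdx? (· = "blank") with
  | none => simp
  | some b =>
    simp only [Option.map_some, List.take_succ_cons, List.mem_cons]
    by_cases hm : ("fence" : String) ∈ cs.take b
    · simp [hm]
    · simp only [hm, or_false]
      rw [if_neg not_false, show i + 1 + b = i + (b + 1) from by omega]
      rw [if_neg (by decide : ¬ (("fence" : String) = "header"))]

theorem pvBscanC_text (cs : List String) (i : Nat) :
    pvBscanC ("text" :: cs) i = pvBscanC cs (i + 1) := by
  simp only [pvBscanC, List.findIdx?_cons]
  rw [if_neg (by decide : ¬ decide (("text" : String) = "blank") = true)]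
  cases hf : cs.findIdx? (· = "blank") with
  | none => simp
  | some b =>
    simp only [Option.map_some, List.take_succ_cons, List.mem_cons]
    by_cases hm : ("fence" : String) ∈ cs.take b
    · simp [hm]
    · simp only [hm, or_false]
      rw [if_neg not_false, show i + 1 + b = i + (b + 1) from by omega]
      rw [if_neg (by decide : ¬ (("fence" : String) = "text"))]

-- step lemmas of the text scan, per literal head category
theorem pvTscanC_blank (cs : List String) (i : Nat) :
    pvTscanC ("blank" :: cs) i = pvTscanC cs (i + 1) := by
  simp only [pvTscanC, List.findIdx?_cons]
  rw [if_neg (by decide : ¬ decide (("blank" : String) = "text") = true)]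
  cases hf : cs.findIdx? (· = "text") with
  | none => simp
  | some t =>
    simp only [Option.map_some, List.take_succ_cons, List.mem_cons]
    by_cases hm : ("fence" : String) ∈ cs.take t
    · simp [hm]
    · simp only [hm, or_false]
      rw [if_neg not_false, List.drop_succ_cons, show i + 1 + t + 1 = i + (t + 1) + 1 from by omega]
      rw [if_neg (by decide : ¬ (("fence" : String) = "blank"))]

theorem pvTscanC_header (cs : List String) (i : Nat) :
    pvTscanC ("header" :: cs) i = pvTscanC cs (i + 1) := by
  simp only [pvTscanC, List.findIdx?_cons]
  rw [if_neg (by decide : ¬ decide (("header" : String) = "text") = true)]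
  cases hf : cs.findIdx? (· = "text") with
  | none => simp
  | some t =>
    simp only [Option.map_some, List.take_succ_cons, List.mem_cons]
    by_cases hm : ("fence" : String) ∈ cs.take t
    · simp [hm]
    · simp only [hm, or_false]
      rw [if_neg not_false, List.drop_succ_cons, show i + 1 + t + 1 = i + (t + 1) + 1 from by omega]
      rw [if_neg (by decide : ¬ (("fence" : String) = "header"))]

theorem pvTscanC_fence (cs : List String) (i : Nat) : pvTscanC ("fence" :: cs) i = none := by
  simp only [pvTscanC, List.findIdx?_cons]
  rw [if_neg (by decide : ¬ decide (("fence" : String) = "text") = true)]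
  cases hf : cs.findIdx? (· = "text") with
  | none => simp
  | some t => simp [List.take_succ_cons]

theorem pvTscanC_text (cs : List String) (i : Nat) :
    pvTscanC ("text" :: cs) i = pvBscanC cs (i + 1) := by
  simp only [pvTscanC, List.findIdx?_cons]
  rw [if_pos (by decide : decide True = true)]
  dsimp only
  simp only [List.take_zero, List.drop_succ_cons, List.drop_zero]
  rw [if_neg (List.not_mem_nil)]

-- A's loop in the in_paragraph = true state is the blank scan over the categories
theorem pvLoopA_true_eq (ls : List String) : ∀ i, pvLoopA ls i true = pvBscanC (ls.map pvCat) i := by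
  induction ls with
  | nil => intro i; rfl
  | cons l rest ih =>
    intro i
    simp only [pvLoopA, List.map_cons]
    by_cases h1 : PySem.Str.strip l = ""
    · rw [if_pos h1, if_pos trivial, pvCat_blank l h1, pvBscanC_blank]
    · rw [if_neg h1]
      by_cases h2 : PySem.Str.startswith (PySem.Str.strip l) "#" = true
      · rw [if_pos h2, pvCat_header l h1 h2, pvBscanC_header, ih]
      · rw [if_neg h2]
        by_cases h3 : PySem.Str.startswith (PySem.Str.strip l) "```" = true
        · rw [if_pos h3, pvCat_fence l h1 h3, pvBscanC_fence]
        · rw [if_neg h3, pvCat_text l h1 h2 h3, pvBscanC_text, ih]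

-- A's loop in the in_paragraph = false state is the text scan over the categories
theorem pvLoopA_false_eq (ls : List String) : ∀ i, pvLoopA ls i false = pvTscanC (ls.map pvCat) i := by
  induction ls with
  | nil => intro i; rfl
  | cons l rest ih =>
    intro i
    simp only [pvLoopA, List.map_cons]
    by_cases h1 : PySem.Str.strip l = ""
    · rw [if_pos h1, if_neg (by decide : ¬ (false = true)), pvCat_blank l h1, pvTscanC_blank, ih]
    · rw [if_neg h1]
      by_cases h2 : PySem.Str.startswith (PySem.Str.strip l) "#" = true
      · rw [if_pos h2, pvCat_header l h1 h2, pvTscanC_header, ih]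
      · rw [if_neg h2]
        by_cases h3 : PySem.Str.startswith (PySem.Str.strip l) "```" = true
        · rw [if_pos h3, pvCat_fence l h1 h3, pvTscanC_fence]
        · rw [if_neg h3, pvCat_text l h1 h2 h3, pvTscanC_text, pvLoopA_true_eq]

theorem pvFindIdx?_lt_length {α : Type} (p : α → Bool) (xs : List α) {n : Nat}
    (h : xs.findIdx? p = some n) : n < xs.length :=
  (List.findIdx?_eq_some_iff_findIdx_eq.mp h).1

-- ===== VERDICT =====
theorem add_more_tag_spec : Claim_equal_add_more_tag := by
  intro body _
  unfold Spec_add_more_tag add_more_tag add_more_tag_alt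
  by_cases hguard : (PySem.Str.isIn "<!--more-->" body || PySem.Str.isIn "<!-- more -->" body) = true
  · rw [if_pos hguard, if_pos hguard]
  · rw [if_neg hguard, if_neg hguard]
    simp only []
    set lines := (PySem.Str.split? body "\n").getD [] with hlines
    rw [pvLoopA_false_eq lines 0, pvTscanC]
    cases hft : (lines.map pvCat).findIdx? (· = "text") with
    | none => rfl
    | some t =>
      simp only []
      by_cases hm1 : ("fence" : String) ∈ (lines.map pvCat).take t
      · rw [if_pos hm1, if_pos hm1]
      · rw [if_neg hm1, if_neg hm1, pvBscanC]
        cases hfb : ((lines.map pvCat).drop (t + 1)).findIdx? (· = "blank") with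
        | none => rfl
        | some b =>
          simp only []
          by_cases hm2 : ("fence" : String) ∈ ((lines.map pvCat).drop (t + 1)).take b
          · rw [if_pos hm2, if_pos hm2]
          · rw [if_neg hm2, if_neg hm2]
            have hp : 0 + t + 1 + b = t + 1 + b := by omega
            rw [hp]
            dsimp only
            rw [if_pos (by omega : t + 1 + b > 0)]
            have hblen : b < ((lines.map pvCat).drop (t + 1)).length :=
              pvFindIdx?_lt_length _ _ hfb
            have hle : t + 1 + b ≤ lines.length := by
              have := (lines.map pvCat).length_drop (i := t + 1)
              rw [List.length_map] at this
              omega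
            rw [PySem.List.insert_natCast lines (t + 1 + b) "\n<!--more-->" hle]
            simp
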